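-- pv_equiv track=rewrite | github.com/li147852xu/researchops-agent | src/researchops/agents/collector.py | _enforce_query_novelty
-- ===== SOURCE A (Python) =====
-- def _enforce_query_novelty(
--     queries: list[str], used_queries: set[str], strategy_level: int,
-- ) -> list[str]:
--     if strategy_level == 0 or not used_queries:
--         used_queries.update(queries)
--         return queries
--
--     novel = [q for q in queries if q not in used_queries]
--     reused = [q for q in queries if q in used_queries]
--     min_novel = max(1, len(queries) // 2)
--     if len(novel) < min_novel:
--         result = novel + reused[: len(queries) - len(novel)]
--     else:
--         result = novel + reused[: max(0, len(queries) - len(novel))]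
--     used_queries.update(result)
--     return result
-- ===== SOURCE B (Python) =====
-- def _enforce_query_novelty(
--     queries: list[str], used_queries: set[str], strategy_level: int,
-- ) -> list[str]:
--     if strategy_level == 0 or not used_queries:
--         used_queries.update(queries)
--         return queries
--     # Both of A's arms reduce to novel + reused (a stable partition):
--     # a stable sort by the membership boolean gives exactly that.
--     result = sorted(queries, key=lambda q: q in used_queries)
--     used_queries.update(result)
--     return result
-- ===== Notes on version B (the rewrite author's own statement) =====
-- stated objective: simpler
-- what changed: A's two filter passes, halving threshold and slice arithmetic all collapse to a stable partition (novel first, reused second), implemented as one stable sort by the membership-boolean key.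
import Mathlib
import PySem

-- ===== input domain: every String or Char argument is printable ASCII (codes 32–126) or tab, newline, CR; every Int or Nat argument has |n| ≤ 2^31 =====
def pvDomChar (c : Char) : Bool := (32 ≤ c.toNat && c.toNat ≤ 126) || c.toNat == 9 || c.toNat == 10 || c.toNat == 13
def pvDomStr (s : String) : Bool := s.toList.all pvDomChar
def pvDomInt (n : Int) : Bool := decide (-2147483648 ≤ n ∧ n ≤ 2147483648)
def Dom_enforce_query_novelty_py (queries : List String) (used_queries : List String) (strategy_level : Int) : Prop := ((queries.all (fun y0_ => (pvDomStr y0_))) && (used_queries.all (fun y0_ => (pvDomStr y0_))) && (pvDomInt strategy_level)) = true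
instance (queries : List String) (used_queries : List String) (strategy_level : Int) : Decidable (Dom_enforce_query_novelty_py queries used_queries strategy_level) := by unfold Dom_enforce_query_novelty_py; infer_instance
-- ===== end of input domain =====

-- B replaces A's two filter passes, threshold and slice arithmetic by one stable sort on the
-- membership-boolean key (objective: simpler). Equivalence is about the RETURN value only:
-- both A and B also mutate the used_queries set in place (B performs the same update).

-- ===== PORT A =====
def enforce_query_novelty_py (queries : List String) (used_queries : List String) (strategy_level : Int) : List String :=
  if strategy_level = 0 ∨ used_queries = [] then
    queries
  else
    let novel := queries.filter (fun q => !(used_queries.contains q))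
    let reused := queries.filter (fun q => used_queries.contains q)
    let min_novel := max 1 (PySem.Int.floordiv (queries.length : Int) 2)
    if (novel.length : Int) < min_novel then
      novel ++ PySem.List.slice reused none (some ((queries.length : Int) - (novel.length : Int)))
    else
      novel ++ PySem.List.slice reused none (some (max 0 ((queries.length : Int) - (novel.length : Int))))

-- ===== PORT B =====
def enforce_query_novelty_py_alt (queries : List String) (used_queries : List String) (strategy_level : Int) : List String :=
  if strategy_level = 0 ∨ used_queries = [] then
    queries
  else
    PySem.List.sorted queries (fun q => used_queries.contains q) false

-- ===== PRECONDITION & SPEC =====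
def Spec_enforce_query_novelty_py (queries : List String) (used_queries : List String) (strategy_level : Int) (out : List String) : Prop := out = enforce_query_novelty_py_alt queries used_queries strategy_level
instance (queries : List String) (used_queries : List String) (strategy_level : Int) (out : List String) : Decidable (Spec_enforce_query_novelty_py queries used_queries strategy_level out) := by unfold Spec_enforce_query_novelty_py; infer_instance

-- ===== CLAIM (what is proved, stated in full; the proofs are below) =====
def Claim_equal_enforce_query_novelty_py : Prop := ∀ (queries : List String) (used_queries : List String) (strategy_level : Int), Dom_enforce_query_novelty_py queries used_queries strategy_level → Spec_enforce_query_novelty_py queries used_queries strategy_level (enforce_query_novelty_py queries used_queries strategy_level)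

-- ===== LEMMAS AND PROOFS =====

-- insertBy walks past a prefix it does not insert into
lemma insertBy_append_of_not_before {α : Type} (before : α → α → Bool) (x : α)
    (A B : List α) (hA : ∀ a ∈ A, before x a = false) :
    PySem.List.insertBy before x (A ++ B) = A ++ PySem.List.insertBy before x B := by
  induction A with
  | nil => rfl
  | cons a t ih =>
    simp only [List.cons_append, PySem.List.insertBy, hA a (by simp)]
    simp only [Bool.false_eq_true, if_false]
    have := ih (fun a ha => hA a (by simp [ha]))
    simp_all

-- stable sort with a Bool key is the stable partition: false-key elements first, true-key second
lemma sorted_bool_eq_partition {α : Type} (xs : List α) (key : α → Bool) :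
    PySem.List.sorted xs key false
      = xs.filter (fun x => !key x) ++ xs.filter (fun x => key x) := by
  rw [PySem.List.sorted_eq_foldl_insertBy]
  suffices h : ∀ (ys A B : List α), (∀ a ∈ A, key a = false) → (∀ b ∈ B, key b = true) →
      ys.foldl (fun acc x => PySem.List.insertBy (fun a b => decide (key a < key b)) x acc) (A ++ B)
        = (A ++ ys.filter (fun x => !key x)) ++ (B ++ ys.filter (fun x => key x)) by
    simpa using h xs [] [] (by simp) (by simp)
  intro ys
  induction ys with
  | nil => intro A B _ _; simp
  | cons x t ih =>
    intro A B hA hB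
    simp only [List.foldl_cons]
    cases hx : key x with
    | false =>
      have hstep : PySem.List.insertBy (fun a b => decide (key a < key b)) x (A ++ B)
          = (A ++ [x]) ++ B := by
        rw [insertBy_append_of_not_before _ _ A B (fun a ha => by simp [hx, hA a ha])]
        cases B with
        | nil => simp [PySem.List.insertBy]
        | cons b tb => simp [PySem.List.insertBy, hx, hB b (by simp)]
      rw [hstep, ih (A ++ [x]) B (by intro a ha; rcases (List.mem_append.mp ha) with h | h
                                     · exact hA a h
                                     · simp at h; simpa [h] using hx) hB]
      simp [hx]
    | true =>
      have hstep : PySem.List.insertBy (fun a b => decide (key a < key b)) x (A ++ B)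
          = A ++ (B ++ [x]) := by
        rw [show A ++ (B ++ [x]) = (A ++ B) ++ [x] by simp]
        exact PySem.List.insertBy_of_forall_not_before _ _ _ (fun y _ => by simp [hx])
      rw [hstep, ih A (B ++ [x]) hA (by intro b hb; rcases (List.mem_append.mp hb) with h | h
                                        · exact hB b h
                                        · simp at h; simpa [h] using hx)]
      simp [hx]

lemma novel_reused_len (queries used_queries : List String) :
    (queries.filter (fun q => !(used_queries.contains q))).length
      + (queries.filter (fun q => used_queries.contains q)).length = queries.length := by
  have h := List.length_eq_length_filter_add (l := queries) (fun q => used_queries.contains q)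
  omega

-- ===== VERDICT (by name: the statement is the Claim_ definition above) =====
theorem enforce_query_novelty_py_spec : Claim_equal_enforce_query_novelty_py := by
  intro queries used_queries strategy_level _
  unfold Spec_enforce_query_novelty_py enforce_query_novelty_py enforce_query_novelty_py_alt
  by_cases hguard : strategy_level = 0 ∨ used_queries = []
  · simp [hguard]
  · simp only [hguard, if_false]
    set novel := queries.filter (fun q => !(used_queries.contains q)) with hnovel
    set reused := queries.filter (fun q => used_queries.contains q) with hreused
    have hlen : novel.length + reused.length = queries.length := novel_reused_len queries used_queries
    have hslice : ∀ (b : Int), b = ((reused.length : Nat) : Int) →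
        PySem.List.slice reused none (some b) = reused := by
      intro b hb
      rw [hb, PySem.List.slice_to_natCast, List.take_length]
    have hb1 : (queries.length : Int) - (novel.length : Int) = ((reused.length : Nat) : Int) := by
      omega
    have hb2 : max 0 ((queries.length : Int) - (novel.length : Int)) = ((reused.length : Nat) : Int) := by
      omega
    rw [sorted_bool_eq_partition queries (fun q => used_queries.contains q)]
    split_ifs <;> rw [hslice _ (by omega)]
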